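-- pv_equiv track=rewrite | github.com/kkimhyeran/Algorithms_ran2 | 프로그래머스/1/135808. 과일 장수/과일 장수.py | solution
-- ===== SOURCE A (Python) =====
-- def solution(k, m, score):
--
--     # 1. 사과 점수 정렬 + k 이하만
--     score.sort(reverse = True)
--
--     # 2. 박스에 나눠 담기
--     cnt = len(score)//m # 박스 개수
--     boxs = []
--     for i in range(0, len(score), m):
--         boxs.append(score[i:i+m])
--
--
--     # 3. 사과 박스별 점수 계산
--     answer = 0
--
--     for box in boxs:
--         if len(box) >= m:
--             answer += min(box)*m
--
--
--     return answer
-- ===== SOURCE B (Python) =====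
-- def solution(k, m, score):
--     # Counting algorithm: histogram of scores + arithmetic over runs of equal
--     # values; no box list, no per-box min, no per-element strided walk.
--     # (A additionally sorts `score` in place; B leaves it untouched — the
--     # equivalence claimed is about the return value only.  k is ignored, as in A.)
--     n = len(score)
--     cnt = n // m          # number of full boxes
--     r = n % m             # in ascending order the box minimums sit at r, r+m, ...
--     freq = {}
--     for v in score:
--         freq[v] = freq.get(v, 0) + 1
--
--     def below(x):
--         # how many of the positions r, r+m, ..., r+(cnt-1)*m are < x
--         return min(cnt, max(0, -((r - x) // m)))
--
--     total = 0
--     pos = 0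
--     for v in sorted(freq):
--         c = freq[v]
--         total += v * (below(pos + c) - below(pos))
--         pos += c
--     return m * total
-- ===== Notes on version B (the rewrite author's own statement) =====
-- stated objective: alternative
-- what changed: B replaces A's sort + box sub-list building + per-box min with a counting algorithm: it builds a frequency dictionary of the scores, walks the distinct values in increasing order, and for each run of equal values adds value * (number of selected box-minimum positions falling inside that run), the count obtained in closed form by clamped ceiling division - no box list, no min() calls, and only the distinct values are sorted.
import Mathlib
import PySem

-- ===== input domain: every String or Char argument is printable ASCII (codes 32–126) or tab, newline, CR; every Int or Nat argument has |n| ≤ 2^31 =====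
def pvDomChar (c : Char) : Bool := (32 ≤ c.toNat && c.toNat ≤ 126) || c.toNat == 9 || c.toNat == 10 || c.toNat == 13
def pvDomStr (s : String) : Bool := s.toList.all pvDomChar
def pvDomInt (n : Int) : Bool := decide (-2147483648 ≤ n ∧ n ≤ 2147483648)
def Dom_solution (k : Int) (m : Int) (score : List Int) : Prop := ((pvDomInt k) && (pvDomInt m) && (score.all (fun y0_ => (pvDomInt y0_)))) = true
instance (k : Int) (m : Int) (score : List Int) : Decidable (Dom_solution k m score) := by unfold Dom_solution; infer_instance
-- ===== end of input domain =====

-- B replaces A's sort + box-building + per-box min with a counting algorithm: a frequency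
-- dictionary plus closed-form counting of selected positions per run of equal values.
-- A sorts `score` in place; B does not mutate it — the equivalence proved is about the return value.


-- ===== PORT A =====
def solution (k : Int) (m : Int) (score : List Int) : Int :=
  let s := PySem.List.sorted score (fun x => x) true
  let _cnt := PySem.Int.floordiv (s.length : Int) m   -- computed by A, never used
  let boxs := (PySem.List.pyRange 0 (s.length : Int) m).foldl
      (fun bs i => bs ++ [PySem.List.slice s (some i) (some (i + m))]) []
  -- min(box): Python raises on an empty box; the branch fires only on boxes of length ≥ m ≥ 1
  -- inside Pre_, so the .getD 0 default is never taken there (exact on the admitted domain)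
  boxs.foldl (fun ans box =>
      if m ≤ (box.length : Int) then ans + ((PySem.List.min? box (fun x => x)).getD 0) * m
      else ans) 0

-- ===== PORT B =====
def solution_alt (k : Int) (m : Int) (score : List Int) : Int :=
  let n : Int := (score.length : Int)
  let cnt := PySem.Int.floordiv n m
  let r := PySem.Int.mod n m
  let freq := score.foldl (fun d v => d.insert v (d.getD v 0 + 1)) PySem.Dict.empty
  let below := fun (x : Int) => min cnt (max 0 (-(PySem.Int.floordiv (r - x) m)))
  let st := (PySem.List.sorted freq.keys (fun x => x) false).foldl
      (fun (st : Int × Int) v =>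
        (st.1 + v * (below (st.2 + freq.getD v 0) - below st.2), st.2 + freq.getD v 0)) (0, 0)
  m * st.1

-- ===== PRECONDITION & SPEC =====
-- Pre_ excludes only m = 0, where A raises ZeroDivisionError at len(score)//m (B raises there too).
def Pre_solution (k : Int) (m : Int) (score : List Int) : Prop := m ≠ 0
instance (k : Int) (m : Int) (score : List Int) : Decidable (Pre_solution k m score) := by unfold Pre_solution; infer_instance
def pvWitness_solution : Int × Int × List Int := (4, 2, [1, 2, 3, 1, 2])

def Spec_solution (k : Int) (m : Int) (score : List Int) (out : Int) : Prop := out = solution_alt k m score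
instance (k : Int) (m : Int) (score : List Int) (out : Int) : Decidable (Spec_solution k m score out) := by unfold Spec_solution; infer_instance

-- ===== CLAIM (what is proved, stated in full; the proofs are below) =====
def Claim_equal_solution : Prop := ∀ (k : Int) (m : Int) (score : List Int), Dom_solution k m score → Pre_solution k m score → Spec_solution k m score (solution k m score)

-- ===== LEMMAS AND PROOFS =====

theorem pvFoldlMinDesc (t : List Int) : ∀ (x : Int),
    (x :: t).Pairwise (fun a b => b ≤ a) →
    t.foldl min x = (x :: t).getLast (List.cons_ne_nil x t) := by
  induction t with
  | nil => intro x _; simp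
  | cons y t ih =>
    intro x h
    have hxy : y ≤ x := (List.pairwise_cons.mp h).1 y (by simp)
    have htail : (y :: t).Pairwise (fun a b : Int => b ≤ a) := (List.pairwise_cons.mp h).2
    rw [List.getLast_cons (List.cons_ne_nil y t)]
    rw [← ih y htail]
    simp [min_eq_right hxy]

theorem pvMinDesc (l : List Int) (hne : l ≠ []) (hp : l.Pairwise (fun a b : Int => b ≤ a)) :
    (PySem.List.min? l (fun x => x)).getD 0 = l.getD (l.length - 1) 0 := by
  cases l with
  | nil => exact absurd rfl hne
  | cons x t =>
    rw [PySem.List.min?_id_cons, Option.getD_some, pvFoldlMinDesc t x hp,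
        List.getLast_eq_getElem, List.getD_eq_getElem _ _ (by simp)]
    rfl

theorem pvMinChunk (s : List Int) (d mn : Nat) (hmn : 0 < mn) (hle : d + mn ≤ s.length)
    (hs : s.Pairwise (fun a b => b ≤ a)) :
    (PySem.List.min? ((s.drop d).take mn) (fun x => x)).getD 0 = s.getD (d + mn - 1) 0 := by
  have hlen : ((s.drop d).take mn).length = mn := by
    simp [List.length_take, List.length_drop]; omega
  have hsub : ((s.drop d).take mn).Sublist s :=
    (List.take_sublist _ _).trans (List.drop_sublist _ _)
  have hne : (s.drop d).take mn ≠ [] := by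
    intro hcon; rw [hcon] at hlen; simp at hlen; omega
  rw [pvMinDesc _ hne (hs.sublist hsub), hlen]
  rw [List.getD_eq_getElem _ _ (by rw [hlen]; omega),
      List.getD_eq_getElem _ _ (by omega : d + mn - 1 < s.length)]
  rw [List.getElem_take, List.getElem_drop]
  congr 1; omega

theorem pvRangeFilter (c N : Nat) (h : c ≤ N) :
    (List.range N).filter (fun kk => decide (kk < c)) = List.range c := by
  rw [show N = c + (N - c) by omega, List.range_add, List.filter_append]
  rw [List.filter_eq_self.mpr (by intro a ha; simp at ha ⊢; omega)]
  rw [List.filter_eq_nil_iff.mpr (by intro a ha; simp at ha ⊢; omega)]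
  simp

theorem pvCoreA (mn : Nat) (hmn : 0 < mn) (s : List Int)
    (hs : s.Pairwise (fun a b : Int => b ≤ a)) :
    ((PySem.List.pyRange 0 (s.length : Int) (mn : Int)).foldl
        (fun bs i => bs ++ [PySem.List.slice s (some i) (some (i + (mn : Int)))]) []).foldl
      (fun ans box => if (mn : Int) ≤ (box.length : Int) then ans + ((PySem.List.min? box (fun x => x)).getD 0) * (mn : Int) else ans) 0
    = ((List.range (s.length / mn)).map (fun j => s.getD (mn * j + mn - 1) 0 * (mn : Int))).sum := by
  have hpos : (0:Int) < (mn : Int) := by exact_mod_cast hmn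
  have hA : PySem.List.pyRange 0 (s.length : Int) (mn : Int) =
      (List.range ((s.length + mn - 1) / mn)).map (fun kk : Nat => ((mn * kk : Nat) : Int)) := by
    rw [PySem.List.pyRange_of_pos _ _ hpos]
    by_cases h0 : s.length = 0
    · rw [h0]
      simp [Nat.div_eq_of_lt (by omega : mn - 1 < mn)]
    · rw [if_pos (by exact_mod_cast Nat.pos_of_ne_zero h0 : (0:Int) < (s.length : Int))]
      have hnum : (s.length : Int) - 0 + (mn : Int) - 1 = ((s.length + mn - 1 : Nat) : Int) := by
        push_cast [Nat.cast_sub (by omega : 1 ≤ s.length + mn)]; ring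
      rw [hnum, ← Int.natCast_div, Int.toNat_natCast]
      apply List.map_congr_left
      intro a _
      push_cast; ring
  rw [hA, PySem.List.foldl_append_singleton_eq_map, List.nil_append, List.map_map]
  rw [show (fun i => PySem.List.slice s (some i) (some (i + (mn : Int)))) ∘
        (fun kk : Nat => ((mn * kk : Nat) : Int))
      = fun kk : Nat => (s.drop (mn * kk)).take mn from
    funext fun kk => PySem.List.slice_natCast_add s (mn * kk) mn]
  rw [PySem.List.foldl_ite_eq_foldl_filter (fun box : List Int => (mn : Int) ≤ (box.length : Int))
    (fun ans box => ans + ((PySem.List.min? box (fun x => x)).getD 0) * (mn : Int))]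
  rw [List.filter_map, List.filter_congr (q := fun kk : Nat => decide (kk < s.length / mn))
    (by
      intro kk _
      simp only [Function.comp]
      apply decide_eq_decide.mpr
      rw [List.length_take, List.length_drop, Nat.cast_le,
        Nat.lt_iff_add_one_le, Nat.le_div_iff_mul_le hmn, add_one_mul, Nat.mul_comm kk mn]
      omega)]
  rw [pvRangeFilter _ _ (Nat.div_le_div_right (by omega : s.length ≤ s.length + mn - 1))]
  rw [PySem.List.foldl_add, List.map_map]
  have hfull : ∀ kk ∈ List.range (s.length / mn), mn * kk + mn ≤ s.length := by
    intro kk hkk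
    rw [List.mem_range, Nat.lt_iff_add_one_le, Nat.le_div_iff_mul_le hmn,
      add_one_mul, Nat.mul_comm kk mn] at hkk
    omega
  rw [List.map_congr_left (fun kk hkk => by
    simp only [Function.comp]
    rw [pvMinChunk s (mn * kk) mn hmn (hfull kk hkk) hs])]
  simp

theorem pvAscRev (score : List Int) :
    PySem.List.sorted score (fun x => x) false
      = (PySem.List.sorted score (fun x => x) true).reverse := by
  apply PySem.List.sorted_id_eq_of_perm_of_pairwise
  · exact (List.reverse_perm _).trans (PySem.List.sorted_perm score (fun x => x) true)
  · rw [List.pairwise_reverse]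
    exact PySem.List.sorted_pairwise_rev score (fun x => x)

theorem pvCountFlat (score ks : List Int) (hnd : ks.Nodup) (u : Int) :
    (ks.flatMap (fun v => List.replicate (score.count v) v)).count u
      = if u ∈ ks then score.count u else 0 := by
  induction ks with
  | nil => simp
  | cons v rest ih =>
    rw [List.flatMap_cons, List.count_append, List.count_replicate,
        ih (List.nodup_cons.mp hnd).2]
    have hv : v ∉ rest := (List.nodup_cons.mp hnd).1
    by_cases huv : u = v
    · subst huv
      simp [hv]
    · simp [List.mem_cons, huv, Ne.symm huv, beq_iff_eq]

theorem pvFlatPairwise (ks : List Int) (f : Int → Nat) (hp : ks.Pairwise (· < ·)) :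
    (ks.flatMap (fun v => List.replicate (f v) v)).Pairwise (· ≤ ·) := by
  induction ks with
  | nil => simp
  | cons v rest ih =>
    rw [List.flatMap_cons, List.pairwise_append]
    refine ⟨List.pairwise_replicate.mpr (Or.inr le_rfl), ih (List.pairwise_cons.mp hp).2, ?_⟩
    intro a ha b hb
    rw [List.eq_of_mem_replicate ha]
    obtain ⟨w, hw, hbw⟩ := List.mem_flatMap.mp hb
    rw [List.eq_of_mem_replicate hbw]
    exact le_of_lt ((List.pairwise_cons.mp hp).1 w hw)

theorem pvAscFlat (score : List Int) :
    PySem.List.sorted score (fun x => x) false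
      = (PySem.List.sorted (PySem.Set.ofList score) (fun x => x) false).flatMap
          (fun v => List.replicate (score.count v) v) := by
  set ks := PySem.List.sorted (PySem.Set.ofList score) (fun x => x) false with hks
  have hlt : ks.Pairwise (· < ·) := PySem.List.sorted_ofList_pairwise_lt score
  have hnd : ks.Nodup := hlt.nodup
  have hmem : ∀ u : Int, u ∈ ks ↔ u ∈ score := by
    intro u
    rw [hks, PySem.List.mem_sorted, PySem.Set.mem_ofList]
  apply PySem.List.sorted_id_eq_of_perm_of_pairwise
  · rw [List.perm_iff_count]
    intro u
    rw [pvCountFlat score ks hnd u]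
    by_cases hu : u ∈ ks
    · rw [if_pos hu]
    · rw [if_neg hu, eq_comm, List.count_eq_zero]
      exact fun hc => hu ((hmem u).mpr hc)
  · exact pvFlatPairwise ks _ hlt

def pvG (asc : List Int) (cntN rN mn p : Nat) : Int :=
  ∑ t ∈ Finset.range cntN, if p ≤ rN + t * mn then asc.getD (rN + t * mn) 0 else 0
def pvC (cntN rN mn p : Nat) : Int :=
  ∑ t ∈ Finset.range cntN, if rN + t * mn < p then (1 : Int) else 0

theorem pvBelowEq (mn cntN rN p : Nat) (hmn : 0 < mn) :
    min ((cntN : Nat) : Int) (max 0 (-(PySem.Int.floordiv ((rN : Int) - (p : Int)) (mn : Int))))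
      = pvC cntN rN mn p := by
  have hpos : (0:Int) < (mn : Int) := by exact_mod_cast hmn
  set q : Int := -(PySem.Int.floordiv ((rN : Int) - (p : Int)) (mn : Int)) with hqdef
  have hq : (q - 1) * (mn : Int) < (p : Int) - (rN : Int) ∧ (p : Int) - (rN : Int) ≤ q * (mn : Int) := by
    have := (PySem.Int.neg_floordiv_neg_eq_iff_of_pos
      (a := (p : Int) - (rN : Int)) (b := (mn : Int)) (q := q) hpos).mp ?_
    · exact this
    · rw [hqdef]; congr 1; congr 1; ring
  have hiff : ∀ t : Nat, (rN + t * mn < p) ↔ (t < q.toNat) := by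
    intro t
    constructor
    · intro h
      have h' : (t : Int) * (mn : Int) < (p : Int) - (rN : Int) := by
        have : ((rN + t * mn : Nat) : Int) < (p : Int) := by exact_mod_cast h
        push_cast at this; linarith
      have htq : (t : Int) < q := by
        by_contra hc
        rw [not_lt] at hc
        have : q * (mn : Int) ≤ (t : Int) * (mn : Int) :=
          mul_le_mul_of_nonneg_right hc (by omega)
        linarith [hq.2]
      omega
    · intro h
      have htq : (t : Int) ≤ q - 1 := by omega
      have h1 : (t : Int) * (mn : Int) ≤ (q - 1) * (mn : Int) :=
        mul_le_mul_of_nonneg_right htq (by omega)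
      have h2 : ((rN + t * mn : Nat) : Int) < (p : Int) := by push_cast; linarith [hq.1]
      exact_mod_cast h2
  unfold pvC
  rw [Finset.sum_boole]
  rw [show (Finset.range cntN).filter (fun t => rN + t * mn < p)
        = Finset.range (min cntN q.toNat) by
    ext a; simp [hiff a]]
  rw [Finset.card_range]
  rw [show max (0:Int) q = ((q.toNat : Nat) : Int) by rw [Int.ofNat_toNat, max_comm]]
  push_cast
  rfl

theorem pvRun (asc : List Int) (cntN rN mn p c : Nat) (v : Int)
    (hconst : ∀ i : Nat, p ≤ i → i < p + c → asc.getD i 0 = v) :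
    pvG asc cntN rN mn p
      = v * (pvC cntN rN mn (p + c) - pvC cntN rN mn p) + pvG asc cntN rN mn (p + c) := by
  unfold pvG pvC
  rw [← Finset.sum_sub_distrib, Finset.mul_sum, ← Finset.sum_add_distrib]
  apply Finset.sum_congr rfl
  intro t _
  by_cases h1 : rN + t * mn < p
  · rw [if_neg (by omega), if_pos (by omega), if_pos h1, if_neg (by omega)]; ring
  · by_cases h2 : rN + t * mn < p + c
    · rw [if_pos (by omega), if_pos h2, if_neg h1, if_neg (by omega),
        hconst (rN + t * mn) (by omega) h2]; ring
    · rw [if_pos (by omega), if_neg h2, if_neg h1, if_pos (by omega)]; ring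

theorem pvGZero (asc : List Int) (cntN rN mn p : Nat)
    (hsel : ∀ t, t < cntN → rN + t * mn < p) : pvG asc cntN rN mn p = 0 := by
  unfold pvG
  exact Finset.sum_eq_zero (fun t ht => by
    rw [if_neg]; have := hsel t (Finset.mem_range.mp ht); omega)

theorem pvFoldB (score asc : List Int) (mn cntN rN : Nat) (below : Int → Int)
    (hbelow : ∀ p : Nat, below (p : Int) = pvC cntN rN mn p)
    (hsel : ∀ t, t < cntN → rN + t * mn < asc.length) :
    ∀ (ks : List Int) (p : Nat) (T : Int),
      asc.drop p = ks.flatMap (fun v => List.replicate (score.count v) v) →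
      (ks.foldl (fun (st : Int × Int) v =>
          (st.1 + v * (below (st.2 + (score.count v : Int)) - below st.2),
           st.2 + (score.count v : Int))) (T, (p : Int))).1
      = T + pvG asc cntN rN mn p := by
  intro ks
  induction ks with
  | nil =>
    intro p T hdrop
    simp only [List.flatMap_nil] at hdrop
    have hlen : asc.length ≤ p := by
      have := List.drop_eq_nil_iff.mp hdrop
      omega
    rw [List.foldl_nil, pvGZero asc cntN rN mn p (fun t ht => lt_of_lt_of_le (hsel t ht) hlen)]
    ring
  | cons v rest ih =>
    intro p T hdrop
    rw [List.flatMap_cons] at hdrop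
    set c : Nat := score.count v with hc
    have hlenp : c ≤ asc.length - p := by
      have := congrArg List.length hdrop
      simp [List.length_drop] at this
      omega
    have hdrop2 : asc.drop (p + c) = rest.flatMap (fun v => List.replicate (score.count v) v) := by
      have : (asc.drop p).drop c = asc.drop (p + c) := by
        rw [List.drop_drop]
      rw [← this, hdrop, List.drop_append_of_le_length (by simp), List.drop_replicate]
      simp
    have hconst : ∀ i : Nat, p ≤ i → i < p + c → asc.getD i 0 = v := by
      intro i hpi hic
      have hi : i < asc.length := by omega
      have hip : i - p < c := by omega
      rw [List.getD_eq_getElem _ _ hi]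
      have : asc[i] = (asc.drop p)[i - p]'(by simp [List.length_drop]; omega) := by
        rw [List.getElem_drop]; congr 1; omega
      rw [this]
      have : (asc.drop p)[i - p]'(by simp [List.length_drop]; omega)
          = (List.replicate c v ++ rest.flatMap (fun v => List.replicate (score.count v) v))[i - p]'(by rw [← hdrop]; simp [List.length_drop]; omega) := by
        congr 1
      rw [this, List.getElem_append_left (by simp [hip]), List.getElem_replicate]
    rw [List.foldl_cons]
    have hcast : (p : Int) + (c : Int) = ((p + c : Nat) : Int) := by push_cast; ring
    rw [show ((T + v * (below ((p:Int) + (c:Int)) - below (p:Int)), (p:Int) + (c:Int)) : Int × Int)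
        = (T + v * (below (((p+c : Nat)):Int) - below (p:Int)), ((p+c : Nat) : Int)) by rw [hcast]]
    rw [ih (p + c) _ hdrop2, hbelow, hbelow, pvRun asc cntN rN mn p c v hconst]
    ring

theorem pvSumRange (N : Nat) (f : Nat → Int) :
    ((List.range N).map f).sum = ∑ j ∈ Finset.range N, f j := by
  induction N with
  | zero => simp
  | succ n ih => rw [List.range_succ, List.map_append, List.sum_append,
      Finset.sum_range_succ, ih]; simp

theorem pvFoldConstBelow (g : Int → Int) (K : Int) (hK : ∀ x, g x = K) :
    ∀ (l : List Int) (cf : Int → Int) (T p : Int),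
      (l.foldl (fun (st : Int × Int) v =>
          (st.1 + v * (g (st.2 + cf v) - g st.2), st.2 + cf v)) (T, p)).1 = T := by
  intro l
  induction l with
  | nil => intro cf T p; rfl
  | cons v rest ih =>
    intro cf T p
    rw [List.foldl_cons, hK, hK]
    have : T + v * (K - K) = T := by ring
    rw [this]
    exact ih cf T (p + cf v)

theorem pvMain (k m : Int) (score : List Int) (hpre : m ≠ 0) :
    solution k m score = solution_alt k m score := by
  simp only [solution, solution_alt]
  rcases lt_or_gt_of_ne hpre with hneg | hpos
  · -- m < 0 : both sides are 0
    have hA : PySem.List.pyRange 0 ((PySem.List.sorted score (fun x => x) true).length : Int) m = [] := by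
      simp [PySem.List.pyRange, hpre]
      rw [if_neg (by omega : ¬ (0:Int) < m)]
      rw [if_neg (by omega : ¬ ((score.length : Nat) : Int) < 0)]
    rw [hA]
    have hcnt : PySem.Int.floordiv ((score.length : Nat) : Int) m ≤ 0 := by
      have h1 := PySem.Int.floordiv_mul_add_mod ((score.length : Nat) : Int) m
      have h2 := PySem.Int.mod_neg_bounds (a := ((score.length : Nat) : Int)) (b := m) hneg
      by_contra hc
      rw [not_le] at hc
      nlinarith [Int.natCast_nonneg score.length]
    have hK : ∀ x : Int, min (PySem.Int.floordiv ((score.length : Nat) : Int) m)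
        (max 0 (-(PySem.Int.floordiv (PySem.Int.mod ((score.length : Nat) : Int) m - x) m)))
        = PySem.Int.floordiv ((score.length : Nat) : Int) m := by
      intro x
      exact min_eq_left (le_trans hcnt (le_max_left 0 _))
    rw [pvFoldConstBelow _ _ hK]
    simp
  · -- 0 < m
    obtain ⟨mn, rfl⟩ : ∃ mn : Nat, m = (mn : Int) :=
      ⟨m.toNat, (Int.toNat_of_nonneg (by omega)).symm⟩
    have hmn : 0 < mn := by exact_mod_cast hpos
    set s := PySem.List.sorted score (fun x => x) true with hsdef
    have hslen : s.length = score.length := PySem.List.length_sorted score (fun x => x) true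
    set n := score.length with hndef
    set cntN := n / mn with hcntdef
    set rN := n % mn with hrdef
    have hnsplit : mn * cntN + rN = n := Nat.div_add_mod n mn
    set asc := PySem.List.sorted score (fun x => x) false with hascdef
    have hasclen : asc.length = n := PySem.List.length_sorted score (fun x => x) false
    -- A side
    rw [pvCoreA mn hmn s (PySem.List.sorted_pairwise_rev score (fun x => x)), hslen]
    rw [pvSumRange]
    have hAside : ∑ j ∈ Finset.range cntN, s.getD (mn * j + mn - 1) 0 * (mn : Int)
        = (∑ t ∈ Finset.range cntN, asc.getD (rN + t * mn) 0) * (mn : Int) := by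
      rw [← Finset.sum_mul]
      congr 1
      rw [← Finset.sum_range_reflect (fun t => asc.getD (rN + t * mn) 0) cntN]
      apply Finset.sum_congr rfl
      intro j hj
      have hjlt : j < cntN := Finset.mem_range.mp hj
      obtain ⟨e, he⟩ : ∃ e, j + 1 + e = cntN := ⟨cntN - 1 - j, by omega⟩
      have hrefl : cntN - 1 - j = e := by omega
      rw [hrefl]
      have hmul : mn * cntN = mn * j + mn + mn * e := by rw [← he]; ring
      rw [hascdef, pvAscRev score, ← hsdef]
      have hidx1 : mn * j + mn - 1 < s.length := by rw [hslen]; omega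
      have hidx2 : rN + e * mn < s.reverse.length := by
        rw [List.length_reverse, hslen]
        have : e * mn = mn * e := Nat.mul_comm e mn
        omega
      rw [List.getD_eq_getElem _ _ hidx1, List.getD_eq_getElem _ _ hidx2]
      rw [List.getElem_reverse]
      congr 1
      rw [hslen]
      have : e * mn = mn * e := Nat.mul_comm e mn
      omega
    rw [hAside]
    -- B side
    have hfreq : score.foldl (fun d v => d.insert v (d.getD v 0 + 1)) PySem.Dict.empty
        = PySem.Dict.counter score := PySem.Dict.foldl_insert_getD_add_one_eq_counter score
    rw [hfreq, PySem.Dict.keys_counter]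
    simp only [PySem.Dict.getD_counter]
    rw [show ((score.length : Nat) : Int) = ((n : Nat) : Int) by rw [hndef]]
    rw [PySem.Int.floordiv_natCast, PySem.Int.mod_natCast, ← hcntdef, ← hrdef]
    set below := fun (x : Int) => min ((cntN : Nat) : Int)
        (max 0 (-(PySem.Int.floordiv (((rN : Nat) : Int) - x) (mn : Int)))) with hbelowdef
    have hbelow : ∀ p : Nat, below (p : Int) = pvC cntN rN mn p := fun p => pvBelowEq mn cntN rN p hmn
    have hsel : ∀ t, t < cntN → rN + t * mn < asc.length := by
      intro t ht
      rw [hasclen]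
      have : t * mn < cntN * mn := Nat.mul_lt_mul_of_lt_of_le ht (le_refl mn) hmn
      have : cntN * mn = mn * cntN := Nat.mul_comm cntN mn
      omega
    have hflat : asc.drop 0 = (PySem.List.sorted (PySem.Set.ofList score) (fun x => x) false).flatMap
        (fun v => List.replicate (score.count v) v) := by
      rw [List.drop_zero, hascdef]; exact pvAscFlat score
    have hfold := pvFoldB score asc mn cntN rN below hbelow hsel
        (PySem.List.sorted (PySem.Set.ofList score) (fun x => x) false) 0 0 hflat
    rw [show ((0 : Int), (0 : Int)) = ((0 : Int), ((0 : Nat) : Int)) by norm_num] at *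
    rw [hfold]
    have hG : pvG asc cntN rN mn 0 = ∑ t ∈ Finset.range cntN, asc.getD (rN + t * mn) 0 := by
      unfold pvG
      exact Finset.sum_congr rfl (fun t _ => if_pos (Nat.zero_le _))
    rw [hG]
    ring

-- ===== VERDICT (by name: the statement is the Claim_ definition above) =====
theorem solution_spec : Claim_equal_solution := by
  intro k m score _ hpre
  unfold Pre_solution at hpre
  exact pvMain k m score hpre
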